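-- pv_equiv track=rewrite | github.com/Origins-XD/fineye-cloud-audit | scripts/parsers/aws_cur.py | _detect_cur_version
-- ===== SOURCE A (Python) =====
-- def _detect_cur_version(columns: list[str]) -> int:
--     """Detect CUR version from column names. Returns 1 or 2."""
--     for col in columns:
--         if "/" in col and ("lineItem" in col or "product" in col or "bill" in col):
--             return 1
--     for col in columns:
--         if col.startswith("line_item_") or col.startswith("bill_"):
--             return 2
--     return 1  # default
-- ===== SOURCE B (Python) =====
-- def _detect_cur_version(columns: list[str]) -> int:
--     """Detect CUR version from column names. Returns 1 or 2."""
--     found_v2 = False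
--     for col in columns:
--         if "/" in col and ("lineItem" in col or "product" in col or "bill" in col):
--             return 1
--         if col.startswith("line_item_") or col.startswith("bill_"):
--             found_v2 = True
--     return 2 if found_v2 else 1
-- ===== Notes on version B (the rewrite author's own statement) =====
-- stated objective: simpler
-- what changed: Replaces A's two sequential scans with a single pass that returns 1 immediately on a v1 match and defers the v2 verdict to a boolean flag checked after the loop.
import Mathlib
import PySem

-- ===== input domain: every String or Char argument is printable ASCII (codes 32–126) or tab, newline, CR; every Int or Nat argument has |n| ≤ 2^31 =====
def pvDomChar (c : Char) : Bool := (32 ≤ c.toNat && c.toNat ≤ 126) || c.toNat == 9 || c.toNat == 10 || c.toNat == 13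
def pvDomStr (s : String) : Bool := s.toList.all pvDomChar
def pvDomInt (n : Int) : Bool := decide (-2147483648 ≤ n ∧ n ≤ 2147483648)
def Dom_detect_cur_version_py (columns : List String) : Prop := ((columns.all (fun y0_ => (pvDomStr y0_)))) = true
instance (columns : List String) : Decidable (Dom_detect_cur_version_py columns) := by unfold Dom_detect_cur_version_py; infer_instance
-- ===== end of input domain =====

-- ===== PORT A =====
-- header: B merges A's two sequential scans into one pass with a deferred v2 flag (objective: simpler); return values only.
-- v1 pattern test: '"/" in col and ("lineItem" in col or "product" in col or "bill" in col)'
def pvIsV1 (col : String) : Bool :=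
  PySem.Str.isIn "/" col && (PySem.Str.isIn "lineItem" col || PySem.Str.isIn "product" col || PySem.Str.isIn "bill" col)

-- v2 pattern test: 'col.startswith("line_item_") or col.startswith("bill_")'
def pvIsV2 (col : String) : Bool :=
  PySem.Str.startswith col "line_item_" || PySem.Str.startswith col "bill_"

-- A's first loop: 'for col in columns: if <v1>: return 1'
def pvALoop1 : List String → Option Int
  | [] => none
  | c :: rest => if pvIsV1 c then some 1 else pvALoop1 rest

-- A's second loop: 'for col in columns: if <v2>: return 2'
def pvALoop2 : List String → Option Int
  | [] => none
  | c :: rest => if pvIsV2 c then some 2 else pvALoop2 rest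

def detect_cur_version_py (columns : List String) : Int :=
  match pvALoop1 columns with
  | some r => r
  | none =>
    match pvALoop2 columns with
    | some r => r
    | none => 1

-- ===== PORT B =====
-- B's single loop with the found_v2 flag; the post-loop 'return 2 if found_v2 else 1' is the base case.
def pvBLoop : List String → Bool → Int
  | [], found_v2 => if found_v2 then 2 else 1
  | c :: rest, found_v2 =>
    if pvIsV1 c then 1
    else pvBLoop rest (found_v2 || pvIsV2 c)

def detect_cur_version_py_alt (columns : List String) : Int :=
  pvBLoop columns false

-- ===== PRECONDITION & SPEC =====
def Spec_detect_cur_version_py (columns : List String) (out : Int) : Prop := out = detect_cur_version_py_alt columns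
instance (columns : List String) (out : Int) : Decidable (Spec_detect_cur_version_py columns out) := by unfold Spec_detect_cur_version_py; infer_instance

-- ===== CLAIM (what is proved, stated in full; the proofs are below) =====
def Claim_equal_detect_cur_version_py : Prop := ∀ (columns : List String), Dom_detect_cur_version_py columns → Spec_detect_cur_version_py columns (detect_cur_version_py columns)

-- ===== LEMMAS AND PROOFS =====
theorem pvALoop2_eq_any (cols : List String) :
    pvALoop2 cols = (if cols.any pvIsV2 then some 2 else none) := by
  induction cols with
  | nil => simp [pvALoop2]
  | cons c rest ih => by_cases h : pvIsV2 c <;> simp [pvALoop2, h, ih]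

theorem pvBLoop_eq (cols : List String) (flag : Bool) :
    pvBLoop cols flag =
      match pvALoop1 cols with
      | some r => r
      | none => if flag || cols.any pvIsV2 then 2 else 1 := by
  induction cols generalizing flag with
  | nil => simp [pvBLoop, pvALoop1]
  | cons c rest ih =>
    by_cases h : pvIsV1 c
    · simp [pvBLoop, pvALoop1, h]
    · simp only [pvBLoop, pvALoop1, h, ih, List.any_cons]
      cases pvALoop1 rest with
      | some r => rfl
      | none => simp [Bool.or_assoc]

-- ===== VERDICT (by name: the statement is the Claim_ definition above) =====
theorem detect_cur_version_py_spec : Claim_equal_detect_cur_version_py := by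
  intro columns _
  unfold Spec_detect_cur_version_py detect_cur_version_py detect_cur_version_py_alt
  rw [pvBLoop_eq, pvALoop2_eq_any]
  cases pvALoop1 columns with
  | some r => rfl
  | none => by_cases h : columns.any pvIsV2 <;> simp [h]
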